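-- pv_equiv track=rewrite | github.com/Sara2487/Compiler | Final_Parser.py | Get_Second_NewLine_Index
-- ===== SOURCE A (Python) =====
-- TKN_NewLine             = 'NEW_LINE'
--
-- def Get_Second_NewLine_Index(Tokens_List, List_Iterator, SecondNewLineIndex):
--
--     # The first For Loop will iterate through the list until it finds a NewLine Token:
--     for i in range(List_Iterator, len(Tokens_List)):
--         if Tokens_List[i] == TKN_NewLine:
--
--         # Once a NewLine Token is found, it means that after it there's another line.
--         # We need the index of the NewLine Token that's in the next line, so we create
--         # another For Loop however this one starts from the index of the NewLine Token
--         # found above + 1: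
--             for x in range(i + 1, len(Tokens_List)):
--                 if Tokens_List[x] == TKN_NewLine:
--
--                     # Once the program reaches here, it means that it has found another
--                     # NewLine Token. It will save the index in a variable and immediately
--                     # break out of the loop, then it will return the index back to the
--                     # method:
--                     SecondNewLineIndex = x
--                     break
--             break
--
--     return SecondNewLineIndex
-- ===== SOURCE B (Python) =====
-- TKN_NewLine = 'NEW_LINE'
--
-- def Get_Second_NewLine_Index(Tokens_List, List_Iterator, SecondNewLineIndex):
--     # Single flat pass: count newline tokens; return the index at which the
--     # count reaches 2, else the passed-in default.
--     count = 0
--     for i in range(List_Iterator, len(Tokens_List)):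
--         if Tokens_List[i] == TKN_NewLine:
--             count += 1
--             if count == 2:
--                 return i
--     return SecondNewLineIndex
-- ===== Notes on version B (the rewrite author's own statement) =====
-- stated objective: simpler
-- what changed: Replaces A's two nested scans (find first newline, then inner loop for the next) with one flat pass that maintains a count of newline tokens and returns the index where the count reaches 2.
import Mathlib
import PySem

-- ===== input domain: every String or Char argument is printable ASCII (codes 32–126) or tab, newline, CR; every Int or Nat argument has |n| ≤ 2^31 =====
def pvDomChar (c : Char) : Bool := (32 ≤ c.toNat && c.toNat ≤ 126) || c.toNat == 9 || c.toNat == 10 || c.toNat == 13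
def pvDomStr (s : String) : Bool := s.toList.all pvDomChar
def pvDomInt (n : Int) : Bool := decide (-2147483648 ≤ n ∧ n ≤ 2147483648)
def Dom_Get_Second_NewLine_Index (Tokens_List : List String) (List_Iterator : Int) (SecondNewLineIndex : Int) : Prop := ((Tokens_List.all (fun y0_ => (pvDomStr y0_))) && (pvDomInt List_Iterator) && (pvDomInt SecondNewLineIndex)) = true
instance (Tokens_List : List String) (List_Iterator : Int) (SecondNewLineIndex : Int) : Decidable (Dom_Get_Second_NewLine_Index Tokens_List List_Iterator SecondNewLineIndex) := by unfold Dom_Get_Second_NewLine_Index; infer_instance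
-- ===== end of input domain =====

-- B replaces A's two nested scans with one flat counting pass (objective: simpler).

-- ===== PORT A =====
-- inner for-loop of A: scan indices for the next NEW_LINE; on match set
-- SecondNewLineIndex and break.
def pvInnerA (tl : List String) (idxs : List Int) (sni : Int) : Int :=
  match idxs with
  | [] => sni
  | x :: rest =>
    if PySem.List.pyGet? tl x = some "NEW_LINE" then x
    else pvInnerA tl rest sni

-- outer for-loop of A: on the first NEW_LINE run the inner loop then break.
def pvOuterA (tl : List String) (idxs : List Int) (sni : Int) : Int :=
  match idxs with
  | [] => sni
  | i :: rest =>
    if PySem.List.pyGet? tl i = some "NEW_LINE" then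
      pvInnerA tl (PySem.List.pyRange (i + 1) (tl.length : Int) 1) sni
    else pvOuterA tl rest sni

def Get_Second_NewLine_Index (Tokens_List : List String) (List_Iterator : Int) (SecondNewLineIndex : Int) : Int :=
  pvOuterA Tokens_List (PySem.List.pyRange List_Iterator (Tokens_List.length : Int) 1) SecondNewLineIndex

-- ===== PORT B =====
-- single pass maintaining a count of NEW_LINE tokens seen; return i when the
-- count reaches 2, else the default.
def pvLoopB (tl : List String) (idxs : List Int) (count : Int) (sni : Int) : Int :=
  match idxs with
  | [] => sni
  | i :: rest =>
    if PySem.List.pyGet? tl i = some "NEW_LINE" then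
      if count + 1 = 2 then i else pvLoopB tl rest (count + 1) sni
    else pvLoopB tl rest count sni

def Get_Second_NewLine_Index_alt (Tokens_List : List String) (List_Iterator : Int) (SecondNewLineIndex : Int) : Int :=
  pvLoopB Tokens_List (PySem.List.pyRange List_Iterator (Tokens_List.length : Int) 1) 0 SecondNewLineIndex

-- ===== PRECONDITION & SPEC =====
-- A raises IndexError (negative index below -len) iff List_Iterator < -len(Tokens_List); B raises there too.
def Pre_Get_Second_NewLine_Index (Tokens_List : List String) (List_Iterator : Int) (SecondNewLineIndex : Int) : Prop :=
  -(Tokens_List.length : Int) ≤ List_Iterator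
instance (Tokens_List : List String) (List_Iterator : Int) (SecondNewLineIndex : Int) : Decidable (Pre_Get_Second_NewLine_Index Tokens_List List_Iterator SecondNewLineIndex) := by unfold Pre_Get_Second_NewLine_Index; infer_instance
def pvWitness_Get_Second_NewLine_Index : List String × Int × Int := (["a", "NEW_LINE", "b", "NEW_LINE"], 0, -1)

def Spec_Get_Second_NewLine_Index (Tokens_List : List String) (List_Iterator : Int) (SecondNewLineIndex : Int) (out : Int) : Prop := out = Get_Second_NewLine_Index_alt Tokens_List List_Iterator SecondNewLineIndex
instance (Tokens_List : List String) (List_Iterator : Int) (SecondNewLineIndex : Int) (out : Int) : Decidable (Spec_Get_Second_NewLine_Index Tokens_List List_Iterator SecondNewLineIndex out) := by unfold Spec_Get_Second_NewLine_Index; infer_instance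

-- ===== CLAIM (what is proved, stated in full; the proofs are below) =====
def Claim_equal_Get_Second_NewLine_Index : Prop := ∀ (Tokens_List : List String) (List_Iterator : Int) (SecondNewLineIndex : Int), Dom_Get_Second_NewLine_Index Tokens_List List_Iterator SecondNewLineIndex → Pre_Get_Second_NewLine_Index Tokens_List List_Iterator SecondNewLineIndex → Spec_Get_Second_NewLine_Index Tokens_List List_Iterator SecondNewLineIndex (Get_Second_NewLine_Index Tokens_List List_Iterator SecondNewLineIndex)

-- ===== LEMMAS AND PROOFS =====

-- after the first NEW_LINE, A's inner loop equals B's loop with count = 1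
theorem pvInnerA_eq_loopB (tl : List String) (idxs : List Int) (sni : Int) :
    pvInnerA tl idxs sni = pvLoopB tl idxs 1 sni := by
  induction idxs with
  | nil => rfl
  | cons x rest ih =>
    by_cases h : PySem.List.pyGet? tl x = some "NEW_LINE"
    · simp [pvInnerA, pvLoopB, h]
    · simp only [pvInnerA, pvLoopB, if_neg h]
      exact ih

-- main loop correspondence, by induction on the range length
theorem pvOuterA_eq_loopB (tl : List String) (sni : Int) :
    ∀ (n : Nat) (a : Int), (tl.length : Int) - a ≤ (n : Int) →
      pvOuterA tl (PySem.List.pyRange a (tl.length : Int) 1) sni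
        = pvLoopB tl (PySem.List.pyRange a (tl.length : Int) 1) 0 sni := by
  intro n
  induction n with
  | zero =>
    intro a ha
    rw [PySem.List.pyRange_one_eq_nil (by omega)]
    rfl
  | succ m ih =>
    intro a ha
    by_cases hb : (tl.length : Int) ≤ a
    · rw [PySem.List.pyRange_one_eq_nil hb]
      rfl
    · rw [PySem.List.pyRange_one_cons (by omega)]
      by_cases h : PySem.List.pyGet? tl a = some "NEW_LINE"
      · simp only [pvOuterA, pvLoopB, if_pos h]
        norm_num
        exact pvInnerA_eq_loopB tl _ sni
      · simp only [pvOuterA, pvLoopB, if_neg h]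
        exact ih (a + 1) (by omega)

-- ===== VERDICT (by name: the statement is the Claim_ definition above) =====
theorem Get_Second_NewLine_Index_spec : Claim_equal_Get_Second_NewLine_Index := by
  intro tl li sni _ _
  unfold Spec_Get_Second_NewLine_Index Get_Second_NewLine_Index Get_Second_NewLine_Index_alt
  exact pvOuterA_eq_loopB tl sni ((tl.length : Int) - li).toNat li (by omega)
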